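-- pv_equiv track=rewrite | github.com/aprozo/root-hackathon2 | add_jsplotting.py | add_js_image_line
-- ===== SOURCE A (Python) =====
-- def add_js_image_line(comment_prefix, lines):
--
--     for i, line in enumerate(lines):
--         if line.strip().startswith(f'{comment_prefix} \\macro_image'):
--             # Update the macro image line to include '(tcanvas_js)'
--             if '(tcanvas_js)' not in line:
--                 lines[i] = f'{comment_prefix} \\macro_image (tcanvas_js)\n'
--                 return lines
--             else:
--                 return lines  # Leave the line as is
--         elif line.strip() == f'{comment_prefix} \\macro_code' and not any(l.strip().startswith(f'{comment_prefix} \\macro_image') for l in lines):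
--             # Insert the macro image line before '\\macro_code' if not already present
--             lines.insert(i, f'{comment_prefix} \\macro_image (tcanvas_js)\n')
--             return lines
--
--     return lines
-- ===== SOURCE B (Python) =====
-- def add_js_image_line(comment_prefix, lines):
--     img = f'{comment_prefix} \\macro_image'
--     # pass 1: if any macro_image line exists, update the first one (if needed) and stop
--     for i, line in enumerate(lines):
--         if line.strip().startswith(img):
--             if '(tcanvas_js)' not in line:
--                 lines[i] = img + ' (tcanvas_js)\n'
--             return lines
--     # pass 2: no macro_image line anywhere -> insert before the first macro_code line
--     code = f'{comment_prefix} \\macro_code'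
--     for i, line in enumerate(lines):
--         if line.strip() == code:
--             lines.insert(i, img + ' (tcanvas_js)\n')
--             return lines
--     return lines
-- ===== Notes on version B (the rewrite author's own statement) =====
-- stated objective: faster
-- what changed: A's single loop re-scans the whole list with any() at every macro_code line (quadratic); B is two sequential linear passes: update the first macro_image line if one exists, otherwise insert before the first macro_code line.
import Mathlib
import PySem

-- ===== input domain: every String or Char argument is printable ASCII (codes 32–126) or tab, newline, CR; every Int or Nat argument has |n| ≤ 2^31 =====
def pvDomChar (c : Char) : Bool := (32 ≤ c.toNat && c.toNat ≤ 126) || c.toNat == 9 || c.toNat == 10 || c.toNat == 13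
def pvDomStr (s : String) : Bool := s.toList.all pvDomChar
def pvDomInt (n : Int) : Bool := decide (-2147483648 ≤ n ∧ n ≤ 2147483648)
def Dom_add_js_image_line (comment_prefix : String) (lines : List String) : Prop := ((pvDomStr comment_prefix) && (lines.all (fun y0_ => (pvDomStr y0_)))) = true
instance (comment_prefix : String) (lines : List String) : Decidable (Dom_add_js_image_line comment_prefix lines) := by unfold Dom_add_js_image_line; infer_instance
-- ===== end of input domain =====

-- B replaces A's single loop with an any() rescan at each macro_code line by two linear passes (measured faster; return value only: both Pythons mutate `lines` in place).
-- ===== PORT A =====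
-- A: one loop; at a macro_code line it rescans the whole list with any().
def ajsLoopA (cp : String) (lines : List String) (rest : List String) (i : Nat) : List String :=
  match rest with
  | [] => lines
  | line :: rs =>
    if PySem.Str.startswith (PySem.Str.strip line) (cp ++ " \\macro_image") then
      if PySem.Str.isIn "(tcanvas_js)" line = false then
        PySem.List.pySetD lines (i : Int) (cp ++ " \\macro_image (tcanvas_js)\n")
      else
        lines
    else if PySem.Str.strip line = cp ++ " \\macro_code" ∧
            (lines.any (fun l => PySem.Str.startswith (PySem.Str.strip l) (cp ++ " \\macro_image"))) = false then
      PySem.List.insert lines (i : Int) (cp ++ " \\macro_image (tcanvas_js)\n")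
    else
      ajsLoopA cp lines rs (i + 1)

def add_js_image_line (comment_prefix : String) (lines : List String) : List String :=
  ajsLoopA comment_prefix lines lines 0

-- ===== PORT B =====
-- B (simpler decomposition): two sequential linear passes, no inner any() scan.
def ajsPass1 (img : String) (lines : List String) (rest : List String) (i : Nat) : Option (List String) :=
  match rest with
  | [] => none
  | line :: rs =>
    if PySem.Str.startswith (PySem.Str.strip line) img then
      some (if PySem.Str.isIn "(tcanvas_js)" line = false then
              PySem.List.pySetD lines (i : Int) (img ++ " (tcanvas_js)\n")
            else lines)
    else ajsPass1 img lines rs (i + 1)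

def ajsPass2 (code : String) (img : String) (lines : List String) (rest : List String) (i : Nat) : List String :=
  match rest with
  | [] => lines
  | line :: rs =>
    if PySem.Str.strip line = code then
      PySem.List.insert lines (i : Int) (img ++ " (tcanvas_js)\n")
    else ajsPass2 code img lines rs (i + 1)

def add_js_image_line_alt (comment_prefix : String) (lines : List String) : List String :=
  let img := comment_prefix ++ " \\macro_image"
  match ajsPass1 img lines lines 0 with
  | some out => out
  | none => ajsPass2 (comment_prefix ++ " \\macro_code") img lines lines 0

-- ===== PRECONDITION & SPEC =====
def Spec_add_js_image_line (comment_prefix : String) (lines : List String) (out : List String) : Prop := out = add_js_image_line_alt comment_prefix lines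
instance (comment_prefix : String) (lines : List String) (out : List String) : Decidable (Spec_add_js_image_line comment_prefix lines out) := by unfold Spec_add_js_image_line; infer_instance

-- ===== CLAIM (what is proved, stated in full; the proofs are below) =====
def Claim_equal_add_js_image_line : Prop := ∀ (comment_prefix : String) (lines : List String), Dom_add_js_image_line comment_prefix lines → Spec_add_js_image_line comment_prefix lines (add_js_image_line comment_prefix lines)

-- ===== LEMMAS AND PROOFS =====

theorem ajs_str_assoc (cp : String) :
    (cp ++ " \\macro_image") ++ " (tcanvas_js)\n" = cp ++ " \\macro_image (tcanvas_js)\n" := by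
  rw [String.append_assoc]
  rfl

-- When some line of `lines` is a macro_image line, A's loop coincides with pass 1 (with fallback `lines`).
theorem ajs_loopA_of_any (cp : String) (lines : List String)
    (h : (lines.any (fun l => PySem.Str.startswith (PySem.Str.strip l) (cp ++ " \\macro_image"))) = true) :
    ∀ (rest : List String) (i : Nat),
      ajsLoopA cp lines rest i =
        (match ajsPass1 (cp ++ " \\macro_image") lines rest i with
         | some out => out
         | none => lines) := by
  intro rest
  induction rest with
  | nil => intro i; simp [ajsLoopA, ajsPass1]
  | cons line rs ih =>
    intro i
    simp only [ajsLoopA, ajsPass1]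
    by_cases hp : PySem.Str.startswith (PySem.Str.strip line) (cp ++ " \\macro_image") = true
    · rw [if_pos hp, if_pos hp, ajs_str_assoc cp]
    · rw [if_neg hp, if_neg hp,
          if_neg (fun hc => by rw [hc.2] at h; exact absurd h (by decide))]
      exact ih (i + 1)

-- When no line of `lines` is a macro_image line, pass 1 finds nothing …
theorem ajs_pass1_none (img : String) (lines : List String) :
    ∀ (rest : List String) (i : Nat),
      (∀ l ∈ rest, PySem.Str.startswith (PySem.Str.strip l) img = false) →
      ajsPass1 img lines rest i = none := by
  intro rest
  induction rest with
  | nil => intro i _; simp [ajsPass1]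
  | cons line rs ih =>
    intro i hall
    have h1 := hall line (by simp)
    simp only [ajsPass1]
    rw [if_neg (fun hc => by rw [hc] at h1; exact absurd h1 (by decide))]
    exact ih (i + 1) (fun l hl => hall l (by simp [hl]))

-- … and A's loop coincides with pass 2.
theorem ajs_loopA_of_none (cp : String) (lines : List String)
    (h : (lines.any (fun l => PySem.Str.startswith (PySem.Str.strip l) (cp ++ " \\macro_image"))) = false) :
    ∀ (rest : List String) (i : Nat),
      (∀ l ∈ rest, PySem.Str.startswith (PySem.Str.strip l) (cp ++ " \\macro_image") = false) →
      ajsLoopA cp lines rest i =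
        ajsPass2 (cp ++ " \\macro_code") (cp ++ " \\macro_image") lines rest i := by
  intro rest
  induction rest with
  | nil => intro i _; simp [ajsLoopA, ajsPass2]
  | cons line rs ih =>
    intro i hall
    have h1 := hall line (by simp)
    simp only [ajsLoopA, ajsPass2]
    rw [if_neg (fun hc => by rw [hc] at h1; exact absurd h1 (by decide))]
    by_cases hq : PySem.Str.strip line = cp ++ " \\macro_code"
    · rw [if_pos ⟨hq, h⟩, if_pos hq, ajs_str_assoc cp]
    · rw [if_neg (fun hc => hq hc.1), if_neg hq]
      exact ih (i + 1) (fun l hl => hall l (by simp [hl]))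

-- Pass 1 succeeds when some line of `rest` is a macro_image line.
theorem ajs_pass1_isSome (img : String) (lines : List String) :
    ∀ (rest : List String) (i : Nat),
      (∃ l ∈ rest, PySem.Str.startswith (PySem.Str.strip l) img = true) →
      (ajsPass1 img lines rest i).isSome := by
  intro rest
  induction rest with
  | nil => intro i h; simp at h
  | cons line rs ih =>
    intro i h
    simp only [ajsPass1]
    by_cases hp : PySem.Str.startswith (PySem.Str.strip line) img = true
    · rw [if_pos hp]; rfl
    · rw [if_neg hp]
      refine ih (i + 1) ?_
      obtain ⟨l, hl, hP⟩ := h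
      rcases List.mem_cons.mp hl with rfl | hl'
      · exact absurd hP hp
      · exact ⟨l, hl', hP⟩

-- ===== VERDICT (by name: the statement is the Claim_ definition above) =====
theorem add_js_image_line_spec : Claim_equal_add_js_image_line := by
  intro cp lines _
  unfold Spec_add_js_image_line add_js_image_line add_js_image_line_alt
  by_cases h : (lines.any (fun l => PySem.Str.startswith (PySem.Str.strip l) (cp ++ " \\macro_image"))) = true
  · obtain ⟨l, hl, hP⟩ := List.any_eq_true.mp h
    obtain ⟨out, hout⟩ := Option.isSome_iff_exists.mp
      (ajs_pass1_isSome (cp ++ " \\macro_image") lines lines 0 ⟨l, hl, hP⟩)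
    simp only [ajs_loopA_of_any cp lines h lines 0, hout]
  · have h' : (lines.any (fun l => PySem.Str.startswith (PySem.Str.strip l) (cp ++ " \\macro_image"))) = false :=
      Bool.eq_false_iff.mpr h
    have hall : ∀ l ∈ lines, PySem.Str.startswith (PySem.Str.strip l) (cp ++ " \\macro_image") = false := by
      simpa using List.any_eq_false.mp h'
    simp only [ajs_pass1_none (cp ++ " \\macro_image") lines lines 0 hall,
        ajs_loopA_of_none cp lines h' lines 0 hall]
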